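-- pv_equiv track=rewrite | github.com/joaquinmartis/TP4-teoria_de_la_informacion | tp4.py | verificaColumnas
-- ===== SOURCE A (Python) =====
-- def verificaColumnas(mensaje_enviado_por_canal):
--     columnasIncorrectas=[]
--     # Obtener las dimensiones de la matriz
--     N = len(mensaje_enviado_por_canal)
--     M = len(mensaje_enviado_por_canal[0])
--
--     for j in range(M-1):
--         suma_columna = sum(mensaje_enviado_por_canal[i][j] for i in range(N-1))
--         # Comparar con el elemento en la posición N de la fila
--         if suma_columna % 2 != mensaje_enviado_por_canal[N-1][j]:
--             columnasIncorrectas.append(j)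
--     return columnasIncorrectas
-- ===== SOURCE B (Python) =====
-- def verificaColumnas(mensaje_enviado_por_canal):
--     N = len(mensaje_enviado_por_canal)
--     M = len(mensaje_enviado_por_canal[0])
--     # running column-parity accumulator over the first N-1 rows
--     colSums = [0] * (M - 1)
--     for row in mensaje_enviado_por_canal[:N - 1]:
--         colSums = [s + x for s, x in zip(colSums, row)]
--     ultima = mensaje_enviado_por_canal[N - 1]
--     return [j for j, s in enumerate(colSums) if s % 2 != ultima[j]]
-- ===== Notes on version B (the rewrite author's own statement) =====
-- stated objective: alternative
-- what changed: A scans column-by-column, re-walking all rows once per column with per-element index arithmetic; B does one row-major pass maintaining a running column-sum vector via zip, then a single parity-check pass over enumerate(colSums).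
import Mathlib
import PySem

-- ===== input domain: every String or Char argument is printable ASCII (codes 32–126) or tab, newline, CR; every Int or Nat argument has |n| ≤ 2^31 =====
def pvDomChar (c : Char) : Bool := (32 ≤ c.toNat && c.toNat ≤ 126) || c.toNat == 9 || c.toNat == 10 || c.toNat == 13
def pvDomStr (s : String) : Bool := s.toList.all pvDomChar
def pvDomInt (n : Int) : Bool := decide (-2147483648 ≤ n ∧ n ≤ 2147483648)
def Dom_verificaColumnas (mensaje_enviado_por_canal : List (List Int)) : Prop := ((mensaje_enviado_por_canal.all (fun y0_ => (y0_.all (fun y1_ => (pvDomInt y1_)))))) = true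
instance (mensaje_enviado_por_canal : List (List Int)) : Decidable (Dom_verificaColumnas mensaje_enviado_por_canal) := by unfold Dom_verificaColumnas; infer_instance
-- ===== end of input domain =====

-- B re-traverses the matrix row-major with a running column-sum vector instead of A's
-- column-by-column rescans; same asymptotic cost, different decomposition.

-- ===== PORT A =====
def verificaColumnas (mensaje_enviado_por_canal : List (List Int)) : List Int :=
  let N : Int := mensaje_enviado_por_canal.length
  let M : Int := (PySem.List.pyGetD mensaje_enviado_por_canal 0 []).length
  (PySem.List.pyRange 0 (M - 1) 1).foldl (fun acc j =>
    let suma_columna :=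
      (PySem.List.pyRange 0 (N - 1) 1).foldl
        (fun s i => s + PySem.List.pyGetD (PySem.List.pyGetD mensaje_enviado_por_canal i []) j 0) 0
    if PySem.Int.mod suma_columna 2 ≠
        PySem.List.pyGetD (PySem.List.pyGetD mensaje_enviado_por_canal (N - 1) []) j 0
    then acc ++ [j] else acc) []

-- ===== PORT B =====
def verificaColumnas_alt (mensaje_enviado_por_canal : List (List Int)) : List Int :=
  let N : Int := mensaje_enviado_por_canal.length
  let M : Int := (PySem.List.pyGetD mensaje_enviado_por_canal 0 []).length
  let colSums : List Int :=
    (PySem.List.slice mensaje_enviado_por_canal (some 0) (some (N - 1))).foldl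
      (fun cs row => (cs.zip row).map (fun p => p.1 + p.2))
      (PySem.List.pyRepeat [(0 : Int)] (M - 1))
  let ultima := PySem.List.pyGetD mensaje_enviado_por_canal (N - 1) []
  ((PySem.List.enumerate colSums).filter
      (fun p => decide (PySem.Int.mod p.2 2 ≠ PySem.List.pyGetD ultima p.1 0))).map (·.1)

-- ===== PRECONDITION & SPEC =====
-- Pre_ excludes exactly the inputs where A raises: the empty matrix (IndexError on [0]),
-- and ragged matrices with some row shorter than M-1 (IndexError while indexing that row).
def Pre_verificaColumnas (mensaje_enviado_por_canal : List (List Int)) : Prop :=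
  mensaje_enviado_por_canal ≠ [] ∧
  ∀ row ∈ mensaje_enviado_por_canal,
    (mensaje_enviado_por_canal.headD []).length ≤ row.length + 1
instance (mensaje_enviado_por_canal : List (List Int)) : Decidable (Pre_verificaColumnas mensaje_enviado_por_canal) := by unfold Pre_verificaColumnas; infer_instance
def pvWitness_verificaColumnas : List (List Int) := [[1, 0, 1], [0, 1, 1], [1, 1, 0]]

def Spec_verificaColumnas (mensaje_enviado_por_canal : List (List Int)) (out : List Int) : Prop := out = verificaColumnas_alt mensaje_enviado_por_canal
instance (mensaje_enviado_por_canal : List (List Int)) (out : List Int) : Decidable (Spec_verificaColumnas mensaje_enviado_por_canal out) := by unfold Spec_verificaColumnas; infer_instance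

-- ===== CLAIM (what is proved, stated in full; the proofs are below) =====
def Claim_equal_verificaColumnas : Prop := ∀ (mensaje_enviado_por_canal : List (List Int)), Dom_verificaColumnas mensaje_enviado_por_canal → Pre_verificaColumnas mensaje_enviado_por_canal → Spec_verificaColumnas mensaje_enviado_por_canal (verificaColumnas mensaje_enviado_por_canal)

-- ===== LEMMAS AND PROOFS =====

lemma enumerate_range_map (f : Nat → Int) (L : Nat) :
    PySem.List.enumerate ((List.range L).map f) 0
      = (List.range L).map (fun (j : Nat) => ((j : Int), f j)) := by
  apply List.ext_getElem
  · simp [PySem.List.length_enumerate]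
  · intro k h1 h2
    simp [PySem.List.getElem_enumerate]

lemma zipfold_char (rows : List (List Int)) :
    ∀ cs : List Int, (∀ row ∈ rows, cs.length ≤ row.length) →
    rows.foldl (fun cs row => (cs.zip row).map (fun p => p.1 + p.2)) cs
      = (List.range cs.length).map
          (fun j => cs.getD j 0 + ((rows.map (fun r => r.getD j 0)).sum)) := by
  induction rows with
  | nil =>
    intro cs _
    simp
    apply List.ext_getElem
    · simp
    · intro k h1 h2
      simp [List.getElem?_eq_getElem h1]
  | cons row rows ih =>
    intro cs h
    have hlen : ((cs.zip row).map (fun p : Int × Int => p.1 + p.2)).length = cs.length := by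
      simp [List.length_zip]
      exact h row (by simp)
    simp only [List.foldl_cons]
    rw [ih _ (by intro r hr; rw [hlen]; exact h r (List.mem_cons_of_mem _ hr))]
    rw [hlen]
    apply List.map_congr_left
    intro j hj
    rw [List.mem_range] at hj
    have hjr : j < row.length := lt_of_lt_of_le hj (h row (by simp))
    rw [List.getD_eq_getElem _ _ (by rw [hlen]; exact hj)]
    simp [List.getElem?_eq_getElem hj, List.getElem?_eq_getElem hjr]
    ring

lemma verificaColumnas_eq (m : List (List Int)) (hne : m ≠ [])
    (hrows : ∀ row ∈ m, (m.headD []).length ≤ row.length + 1) :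
    verificaColumnas m = verificaColumnas_alt m := by
  simp only [verificaColumnas, verificaColumnas_alt]
  have hlen1 : 1 ≤ m.length := List.length_pos_of_ne_nil hne
  set Mn : Nat := (PySem.List.pyGetD m 0 ([] : List Int)).length with hMn
  have hMhead : PySem.List.pyGetD m 0 ([] : List Int) = m.headD [] := by
    simp [PySem.List.pyGetD_zero, List.getD]
    cases m with
    | nil => simp at hne
    | cons a t => simp
  set L : Nat := ((Mn : Int) - 1).toNat with hL
  -- rows of dropLast are long enough
  have hdrop : ∀ row ∈ m.dropLast, L ≤ row.length := by
    intro row hr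
    have := hrows row (List.mem_of_mem_dropLast hr)
    rw [hMhead] at hMn
    omega
  -- B's slice is dropLast
  have hslice : PySem.List.slice m (some 0) (some ((m.length : Int) - 1)) = m.dropLast := by
    rw [PySem.List.slice_zero_start, PySem.List.slice_to m (by omega : (0:Int) ≤ (m.length : Int) - 1)]
    rw [List.dropLast_eq_take]
    congr 1
    omega
  rw [hslice, PySem.List.pyRepeat_singleton]
  rw [zipfold_char m.dropLast _ (by rw [List.length_replicate]; exact hdrop)]
  rw [List.length_replicate]
  -- replicate getD = 0
  have hcs : (List.range L).map
      (fun j => (List.replicate L (0:Int)).getD j 0 + ((m.dropLast.map (fun r => r.getD j 0)).sum))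
      = (List.range L).map (fun j => (m.dropLast.map (fun r => r.getD j 0)).sum) := by
    apply List.map_congr_left
    intro j hj
    rw [List.mem_range] at hj
    simp
  rw [hcs, enumerate_range_map]
  rw [List.filter_map, List.map_map]
  -- A side
  rw [PySem.List.foldl_append_ite_eq_filter, List.nil_append]
  rw [PySem.List.pyRange_one 0 ((Mn:Int) - 1)]
  rw [List.filter_map]
  have hLL : ((Mn:Int) - 1 - 0).toNat = L := by omega
  rw [hLL]
  -- inner sums agree
  have hsum : ∀ j : Nat, j < L →
      (PySem.List.pyRange 0 ((m.length : Int) - 1) 1).foldl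
        (fun s i => s + PySem.List.pyGetD (PySem.List.pyGetD m i []) ((j:Int)) 0) 0
      = (m.dropLast.map (fun r => r.getD j 0)).sum := by
    intro j hj
    have hcongr : (PySem.List.pyRange 0 ((m.length : Int) - 1) 1).foldl
        (fun s i => s + PySem.List.pyGetD (PySem.List.pyGetD m i []) ((j:Int)) 0) 0
        = (PySem.List.pyRange 0 ((m.length : Int) - 1) 1).foldl
        (fun s i => s + PySem.List.pyGetD (PySem.List.pyGetD m.dropLast i ([] : List Int)) ((j:Int)) 0) 0 := by
      apply PySem.List.foldl_congr_mem
      intro acc i hi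
      rw [PySem.List.mem_pyRange_one] at hi
      congr 2
      rw [PySem.List.pyGetD_eq_getElem m ([] : List Int) (by omega) (by omega),
          PySem.List.pyGetD_eq_getElem m.dropLast ([] : List Int) (by omega) (by simp [List.length_dropLast]; omega)]
      rw [List.getElem_dropLast]
    rw [hcongr]
    have hlen2 : (m.length : Int) - 1 = (m.dropLast.length : Int) := by
      simp [List.length_dropLast]; omega
    rw [hlen2]
    rw [PySem.List.foldl_pyRange_zero_pyGetD' m.dropLast ([] : List Int)
        (fun s row => s + PySem.List.pyGetD row ((j:Int)) 0) 0]
    rw [PySem.List.foldl_add]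
    simp
  -- final congruence
  simp only [Function.comp_def, zero_add]
  congr 1
  apply List.filter_congr
  intro j hj
  rw [List.mem_range] at hj
  rw [hsum j hj]

-- ===== VERDICT (by name: the statement is the Claim_ definition above) =====
theorem verificaColumnas_spec : Claim_equal_verificaColumnas := by
  intro m _ hpre
  unfold Spec_verificaColumnas
  exact verificaColumnas_eq m hpre.1 hpre.2
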